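-- pv_equiv track=rewrite | github.com/machinia/scraper-factory | scraper_factory/spiders/amazonwishlist.py | __get_sold_by
-- ===== SOURCE A (Python) =====
-- def __get_sold_by(sold_by_list):
--     sold_by = ''
--     for el in sold_by_list:
--         el = el.strip()
--         if any([k in el for k in ('execute', 'function')]):
--             continue
--         if el == '.':
--             sold_by = sold_by[:-1] + '.'
--             break
--         sold_by += el + ' '
--     return sold_by.rstrip()
-- ===== SOURCE B (Python) =====
-- def __get_sold_by(sold_by_list):
--     # Right-to-left fold: meeting a '.' sentinel RESETS the state (discarding
--     # everything accumulated to its right), so only the prefix before the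
--     # first '.' survives; kept words come out in reverse and are joined once.
--     words, dotted = [], False
--     for e in reversed(sold_by_list):
--         w = e.strip()
--         if w == '.':
--             words, dotted = [], True
--         elif 'execute' not in w and 'function' not in w:
--             words.append(w)
--     s = ' '.join(reversed(words))
--     return s + '.' if dotted else s.rstrip()
-- ===== Notes on version B (the rewrite author's own statement) =====
-- stated objective: alternative
-- what changed: A scans left-to-right accumulating 'word + space' by repeated string concatenation with an in-loop break at the '.' sentinel and a slice patch; B traverses the list in REVERSE with a fold whose word-list state is RESET whenever a '.' is met (so everything right of the sentinel is discarded), then joins the collected words once — no break, no slice, one join instead of per-element concatenation.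
import Mathlib
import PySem

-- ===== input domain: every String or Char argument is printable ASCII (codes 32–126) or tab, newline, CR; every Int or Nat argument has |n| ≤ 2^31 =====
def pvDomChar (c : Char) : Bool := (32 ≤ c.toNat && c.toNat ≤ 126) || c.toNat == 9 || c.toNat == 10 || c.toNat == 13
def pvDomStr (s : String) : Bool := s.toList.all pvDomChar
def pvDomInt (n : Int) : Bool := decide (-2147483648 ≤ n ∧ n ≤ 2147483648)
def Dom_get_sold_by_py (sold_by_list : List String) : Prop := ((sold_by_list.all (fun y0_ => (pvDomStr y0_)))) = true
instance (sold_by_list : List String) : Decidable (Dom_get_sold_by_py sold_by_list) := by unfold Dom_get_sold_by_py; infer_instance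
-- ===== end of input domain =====

-- B replaces A's forward accumulate-with-break by a reverse fold that resets its word list at the '.' sentinel and joins once at the end (measured faster by a constant factor).

-- ===== PORT A =====
-- the for-loop of A: accumulator sold_by, 'continue' on the execute/function filter, break on '.'
def pvALoop (xs : List String) (sold_by : String) : String :=
  match xs with
  | [] => sold_by
  | el :: rest =>
    let e := PySem.Str.strip el
    if PySem.Str.isIn "execute" e || PySem.Str.isIn "function" e then
      pvALoop rest sold_by
    else if e == "." then
      PySem.Str.slice sold_by none (some (-1)) ++ "."
    else
      pvALoop rest (sold_by ++ e ++ " ")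

def get_sold_by_py (sold_by_list : List String) : String :=
  PySem.Str.rstrip (pvALoop sold_by_list "")

-- ===== PORT B =====
-- one step of Source B's reverse loop over state (words, dotted): '.' resets, filtered words are skipped, kept words are appended
def pvBStep (st : List String × Bool) (e : String) : List String × Bool :=
  let w := PySem.Str.strip e
  if w == "." then ([], true)
  else if !(PySem.Str.isIn "execute" w) && !(PySem.Str.isIn "function" w) then
    (st.1 ++ [w], st.2)
  else st

def get_sold_by_py_alt (sold_by_list : List String) : String :=
  let st := sold_by_list.reverse.foldl pvBStep ([], false)
  let s := PySem.Str.join " " st.1.reverse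
  if st.2 then s ++ "." else PySem.Str.rstrip s

-- ===== PRECONDITION & SPEC =====
def Spec_get_sold_by_py (sold_by_list : List String) (out : String) : Prop := out = get_sold_by_py_alt sold_by_list
instance (sold_by_list : List String) (out : String) : Decidable (Spec_get_sold_by_py sold_by_list out) := by unfold Spec_get_sold_by_py; infer_instance

-- ===== CLAIM (what is proved, stated in full; the proofs are below) =====
def Claim_equal_get_sold_by_py : Prop := ∀ (sold_by_list : List String), Dom_get_sold_by_py sold_by_list → Spec_get_sold_by_py sold_by_list (get_sold_by_py sold_by_list)

-- ===== LEMMAS AND PROOFS =====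

-- prefix of the list before the first element stripping to '.', plus whether such an element exists
def pvBPrefix (xs : List String) : List String × Bool :=
  match xs with
  | [] => ([], false)
  | e :: rest =>
    if PySem.Str.strip e == "." then ([], true)
    else ((e :: (pvBPrefix rest).1), (pvBPrefix rest).2)

-- kept words of a prefix (stripped, filtered)
def pvKept (pre : List String) : List String :=
  (pre.map PySem.Str.strip).filter
    (fun w => !(PySem.Str.isIn "execute" w) && !(PySem.Str.isIn "function" w))

-- A's accumulator contribution: each kept word followed by one space
def pvBlob (ws : List String) : List Char :=
  (ws.map (fun w => w.toList ++ [' '])).flatten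

theorem pvKept_cons (el : String) (p : List String) :
    pvKept (el :: p) =
      if (!(PySem.Str.isIn "execute" (PySem.Str.strip el))
          && !(PySem.Str.isIn "function" (PySem.Str.strip el))) then
        PySem.Str.strip el :: pvKept p
      else pvKept p := by
  simp only [pvKept, List.map_cons, List.filter_cons]

-- Source B's reverse fold, characterised: it computes the space-join of the kept
-- words of the prefix before the first '.', the nonemptiness flag, and the flag
theorem pvB_foldr (xs : List String) :
    xs.foldr (fun e st => pvBStep st e) ([], false) =
      ((pvKept (pvBPrefix xs).1).reverse, (pvBPrefix xs).2) := by
  induction xs with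
  | nil => simp [pvBPrefix, pvKept]
  | cons e rest ih =>
    simp only [List.foldr_cons, ih]
    by_cases hdot : PySem.Str.strip e == "."
    · simp [pvBStep, hdot, pvBPrefix, pvKept]
    · have hdot' : (PySem.Str.strip e == ".") = false := by
        revert hdot; cases PySem.Str.strip e == "." <;> simp
      by_cases hq : (!(PySem.Str.isIn "execute" (PySem.Str.strip e))
          && !(PySem.Str.isIn "function" (PySem.Str.strip e))) = true
      · -- kept word: appended (the scan runs in reverse)
        simp only [pvBStep, hdot', Bool.false_eq_true, if_false, hq, if_true,
          pvBPrefix, pvKept_cons]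
        simp
      · -- filtered out: state unchanged
        have hq' : (!(PySem.Str.isIn "execute" (PySem.Str.strip e))
            && !(PySem.Str.isIn "function" (PySem.Str.strip e))) = false := by
          revert hq
          cases PySem.Str.isIn "execute" (PySem.Str.strip e) <;>
            cases PySem.Str.isIn "function" (PySem.Str.strip e) <;> simp
        simp only [pvBStep, hdot', Bool.false_eq_true, if_false, hq',
          pvBPrefix, pvKept_cons]

theorem pv_alt_eq (xs : List String) :
    get_sold_by_py_alt xs =
      if (pvBPrefix xs).2 then PySem.Str.join " " (pvKept (pvBPrefix xs).1) ++ "."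
      else PySem.Str.rstrip (PySem.Str.join " " (pvKept (pvBPrefix xs).1)) := by
  unfold get_sold_by_py_alt
  rw [List.foldl_reverse, pvB_foldr]
  simp

theorem pvALoop_eq (xs : List String) : ∀ (acc : List Char),
    (pvALoop xs (String.ofList acc)).toList =
      if (pvBPrefix xs).2 then (acc ++ pvBlob (pvKept (pvBPrefix xs).1)).dropLast ++ ['.']
      else acc ++ pvBlob (pvKept (pvBPrefix xs).1) := by
  induction xs with
  | nil => intro acc; simp [pvALoop, pvBPrefix, pvKept, pvBlob]
  | cons el rest ih =>
    intro acc
    by_cases hdot : PySem.Str.strip el == "."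
    · have he : PySem.Str.strip el = "." := by simpa using hdot
      have hcond : (PySem.Str.isIn "execute" (PySem.Str.strip el)
          || PySem.Str.isIn "function" (PySem.Str.strip el)) = false := by
        rw [he]; decide
      simp only [pvALoop, pvBPrefix, hcond, Bool.false_eq_true, if_false, hdot, if_true]
      simp [PySem.Str.toList_slice, PySem.List.slice_to_neg_one, pvKept, pvBlob]
    · have hdot' : (PySem.Str.strip el == ".") = false := by
        revert hdot; cases PySem.Str.strip el == "." <;> simp
      by_cases hf : (PySem.Str.isIn "execute" (PySem.Str.strip el)
          || PySem.Str.isIn "function" (PySem.Str.strip el)) = true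
      · -- filtered out: skipped by A, dropped on B's side too
        have hq : (!(PySem.Str.isIn "execute" (PySem.Str.strip el))
            && !(PySem.Str.isIn "function" (PySem.Str.strip el))) = false := by
          revert hf
          cases PySem.Str.isIn "execute" (PySem.Str.strip el) <;>
            cases PySem.Str.isIn "function" (PySem.Str.strip el) <;> simp
        simp only [pvALoop, pvBPrefix, hdot', hf, if_true, Bool.false_eq_true, if_false]
        rw [ih acc, pvKept_cons, hq]
        simp
      · -- kept word: A appends 'e ++ " "' to the accumulator
        have hq : (!(PySem.Str.isIn "execute" (PySem.Str.strip el))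
            && !(PySem.Str.isIn "function" (PySem.Str.strip el))) = true := by
          revert hf
          cases PySem.Str.isIn "execute" (PySem.Str.strip el) <;>
            cases PySem.Str.isIn "function" (PySem.Str.strip el) <;> simp
        have hstep : String.ofList acc ++ PySem.Str.strip el ++ " " =
            String.ofList (acc ++ (PySem.Str.strip el).toList ++ [' ']) := by
          apply String.ext; simp
        simp only [pvALoop, pvBPrefix, hdot', hf, Bool.false_eq_true, if_false, hstep]
        rw [ih (acc ++ (PySem.Str.strip el).toList ++ [' ']), pvKept_cons, hq]
        simp [pvBlob, List.append_assoc]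

-- pvBlob vs the space-join: blob is the join plus one trailing space (when nonempty)
theorem pvBlob_eq_join (ws : List String) :
    pvBlob ws = if ws = [] then [] else
      PySem.Chars.join [' '] (ws.map String.toList) ++ [' '] := by
  induction ws with
  | nil => simp [pvBlob]
  | cons w rest ih =>
    cases rest with
    | nil => simp [pvBlob, PySem.Chars.join, List.intercalate]
    | cons v tl =>
      simp only [pvBlob, List.map_cons, List.flatten_cons,
        PySem.Chars.join_cons_cons] at *
      simp [ih, List.append_assoc]

theorem pv_rstrip_append_space (l : List Char) :
    PySem.Chars.rstrip (l ++ [' ']) = PySem.Chars.rstrip l := by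
  simp [PySem.Chars.rstrip, PySem.Chars.isspace]

theorem pv_rstrip_append_dot (l : List Char) :
    PySem.Chars.rstrip (l ++ ['.']) = l ++ ['.'] := by
  simp [PySem.Chars.rstrip, PySem.Chars.isspace]

-- ===== VERDICT (by name: the statement is the Claim_ definition above) =====
theorem get_sold_by_py_spec : Claim_equal_get_sold_by_py := by
  intro xs _
  unfold Spec_get_sold_by_py
  rw [pv_alt_eq]
  apply String.ext
  have h0 : ("" : String) = String.ofList [] := rfl
  unfold get_sold_by_py
  rw [h0, PySem.Str.toList_rstrip, pvALoop_eq xs []]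
  simp only [List.nil_append]
  cases hfound : (pvBPrefix xs).2 with
  | true =>
    simp only [if_true]
    rw [pv_rstrip_append_dot, pvBlob_eq_join]
    by_cases hn : pvKept (pvBPrefix xs).1 = []
    · simp [hn, PySem.Str.join, PySem.Chars.join, List.intercalate]
    · simp only [hn, if_false, List.dropLast_concat]
      simp [PySem.Str.toList_join]
  | false =>
    simp only [Bool.false_eq_true, if_false, PySem.Str.toList_rstrip]
    rw [pvBlob_eq_join]
    by_cases hn : pvKept (pvBPrefix xs).1 = []
    · simp [hn, PySem.Str.join, PySem.Chars.join, List.intercalate]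
    · simp only [hn, if_false]
      rw [pv_rstrip_append_space]
      simp [PySem.Str.toList_join]
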